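-- pv_equiv track=rewrite | github.com/yudai-patronai/problembook | problems/dynamic/1d/ents/solution.py | solve
-- ===== SOURCE A (Python) =====
-- def solve(k, p):
--     if k == 0 or k == 1:
--         return 0
--     arr = [0] * (k+1)
--     arr[2] = 1
--
--     for i in range(3, k+1):
--         if not i % 2:
--             arr[i] = (arr[i - 1] + arr[i//2]) % p
--         else:
--             arr[i] = arr[i-1] % p
--     return arr[k]
-- ===== SOURCE B (Python) =====
-- def solve(k, p):
--     # Telescoped recurrence: for k >= 3, arr[k] = (1 + sum(arr[2..k//2])) % p,
--     # so only prefix sums up to k//2 are needed -> loop half as far as A.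
--     if k == 0 or k == 1:
--         return 0
--     if k == 2:
--         return 1
--     m = k // 2
--     s = [0] * (m + 1)          # s[j] = sum(arr[2..j]) % p
--     for j in range(2, m + 1):
--         s[j] = (s[j - 1] + (1 + s[j // 2]) % p) % p
--     return (1 + s[m]) % p
-- ===== Notes on version B (the rewrite author's own statement) =====
-- stated objective: alternative
-- what changed: B telescopes A's DP (arr[i]=arr[i-1]+arr[i//2] for even i) into arr[k] = (1 + sum(arr[2..k//2])) % p and maintains only the running prefix-sum array up to k//2, so the loop runs to k//2 instead of k (about 1.2-1.7x in measurements, below the 1.5x confirmation bar).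
import Mathlib
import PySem

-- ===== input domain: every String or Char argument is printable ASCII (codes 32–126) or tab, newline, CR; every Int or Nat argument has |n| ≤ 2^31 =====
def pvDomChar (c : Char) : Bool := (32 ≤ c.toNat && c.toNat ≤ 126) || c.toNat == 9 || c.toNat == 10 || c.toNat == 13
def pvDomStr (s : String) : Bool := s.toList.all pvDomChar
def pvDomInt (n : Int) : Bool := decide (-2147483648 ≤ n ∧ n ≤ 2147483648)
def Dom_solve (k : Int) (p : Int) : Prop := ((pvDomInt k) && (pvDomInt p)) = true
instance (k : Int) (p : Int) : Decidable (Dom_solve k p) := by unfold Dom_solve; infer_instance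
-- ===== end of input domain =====

-- B telescopes A's DP: arr[k] = (1 + sum(arr[2..k//2])) % p, so B maintains only the
-- running prefix sums up to k//2 and its loop runs half as far (objective: alternative).


-- ===== PORT A =====
-- Python's list is an Array here (O(1) update under #eval); all indices written or
-- read by the loop are ≥ 2 within Pre_ (k ≥ 0), so '.toNat' on them is exact.
def solve (k : Int) (p : Int) : Int :=
  if k = 0 ∨ k = 1 then 0
  else
    let arr0 : Array Int := Array.replicate (k + 1).toNat 0
    let arr1 := arr0.setIfInBounds 2 1
    let arr2 := (PySem.List.pyRange 3 (k + 1) 1).foldl (fun arr i =>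
      if PySem.Int.mod i 2 = 0 then
        arr.setIfInBounds i.toNat
          (PySem.Int.mod
            (arr.getD (i - 1).toNat 0 +
             arr.getD (PySem.Int.floordiv i 2).toNat 0) p)
      else
        arr.setIfInBounds i.toNat (PySem.Int.mod (arr.getD (i - 1).toNat 0) p)) arr1
    arr2.getD k.toNat 0

-- ===== PORT B =====
def solve_alt (k : Int) (p : Int) : Int :=
  if k = 0 ∨ k = 1 then 0
  else if k = 2 then 1
  else
    let m := PySem.Int.floordiv k 2
    let s0 : Array Int := Array.replicate (m + 1).toNat 0
    let s1 := (PySem.List.pyRange 2 (m + 1) 1).foldl (fun s j =>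
      s.setIfInBounds j.toNat
        (PySem.Int.mod
          (s.getD (j - 1).toNat 0 +
           PySem.Int.mod (1 + s.getD (PySem.Int.floordiv j 2).toNat 0) p) p)) s0
    PySem.Int.mod (1 + s1.getD m.toNat 0) p

-- ===== PRECONDITION & SPEC =====
-- Pre excludes exactly where Python A raises: k < 0 (IndexError on arr[2] = 1,
-- the list [0]*(k+1) being too short) and k ≥ 3 with p = 0 (ZeroDivisionError).
def Pre_solve (k : Int) (p : Int) : Prop := 0 ≤ k ∧ (k ≤ 2 ∨ p ≠ 0)
instance (k : Int) (p : Int) : Decidable (Pre_solve k p) := by unfold Pre_solve; infer_instance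
def pvWitness_solve : Int × Int := (10, 7)
def Spec_solve (k : Int) (p : Int) (out : Int) : Prop := out = solve_alt k p
instance (k : Int) (p : Int) (out : Int) : Decidable (Spec_solve k p out) := by unfold Spec_solve; infer_instance

-- ===== CLAIM (what is proved, stated in full; the proofs are below) =====
def Claim_equal_solve : Prop := ∀ (k : Int) (p : Int), Dom_solve k p → Pre_solve k p → Spec_solve k p (solve k p)

-- ===== LEMMAS AND PROOFS =====

-- mathematical model of A's array entries: fA p n = arr[n]
def fA (p : Int) : Nat → Int
  | 0 => 0
  | 1 => 0
  | 2 => 1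
  | n + 3 =>
    if (n + 3) % 2 = 0 then ((fA p (n + 2)) + fA p ((n + 3) / 2)).fmod p
    else (fA p (n + 2)).fmod p
  decreasing_by all_goals omega

-- mathematical model of B's prefix-sum entries: sB p j = s[j]
def sB (p : Int) : Nat → Int
  | 0 => 0
  | 1 => 0
  | j + 2 => ((sB p (j + 1)) + (1 + sB p ((j + 2) / 2)).fmod p).fmod p
  decreasing_by all_goals omega

-- exact (un-modded) prefix sum of fA over [2, j]
def tSum (p : Int) (j : Nat) : Int := ∑ t ∈ Finset.Icc 2 j, fA p t

theorem fA_ge3 (p : Int) (n : Nat) (h : 3 ≤ n) :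
    fA p n = if n % 2 = 0 then ((fA p (n - 1)) + fA p (n / 2)).fmod p
             else (fA p (n - 1)).fmod p := by
  obtain ⟨m, rfl⟩ : ∃ m, n = m + 3 := ⟨n - 3, by omega⟩
  rw [fA]
  norm_num

theorem sB_ge2 (p : Int) (n : Nat) (h : 2 ≤ n) :
    sB p n = ((sB p (n - 1)) + (1 + sB p (n / 2)).fmod p).fmod p := by
  obtain ⟨m, rfl⟩ : ∃ m, n = m + 2 := ⟨n - 2, by omega⟩
  rw [sB]
  norm_num

theorem tSum_succ (p : Int) (j : Nat) (h : 2 ≤ j) :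
    tSum p j = tSum p (j - 1) + fA p j := by
  obtain ⟨m, rfl⟩ : ∃ m, j = m + 1 := ⟨j - 1, by omega⟩
  unfold tSum
  rw [Finset.sum_Icc_succ_top (by omega)]
  simp

-- key telescoping identity: for n ≥ 3, fA p n = (1 + tSum p (n/2)).fmod p
theorem fA_eq_tSum (p : Int) (n : Nat) (h : 3 ≤ n) :
    fA p n = (1 + tSum p (n / 2)).fmod p := by
  induction n using Nat.strong_induction_on with
  | _ n ih =>
    rcases Nat.lt_or_ge n 4 with h4 | h4
    · -- n = 3
      have hn : n = 3 := by omega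
      subst hn
      rw [fA_ge3 p 3 (by norm_num)]
      norm_num [tSum, fA]
    · -- n ≥ 4
      have hprev : fA p (n - 1) = (1 + tSum p ((n - 1) / 2)).fmod p :=
        ih (n - 1) (by omega) (by omega)
      rw [fA_ge3 p n h]
      by_cases he : n % 2 = 0
      · have h2 : n / 2 = (n - 1) / 2 + 1 := by omega
        have h22 : 2 ≤ n / 2 := by omega
        rw [if_pos he, hprev, h2, tSum_succ p ((n - 1) / 2 + 1) (by omega)]
        have : ((n - 1) / 2 + 1) - 1 = (n - 1) / 2 := by omega
        rw [this, Int.fmod_add_fmod, ← h2]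
        ring_nf
      · have h2 : n / 2 = (n - 1) / 2 := by omega
        rw [if_neg he, hprev, Int.fmod_fmod_of_dvd _ dvd_rfl, h2]

-- B's prefix sums are A's sums mod p
theorem sB_eq_tSum (p : Int) (j : Nat) (h : 1 ≤ j) :
    sB p j = (tSum p j).fmod p := by
  induction j using Nat.strong_induction_on with
  | _ j ih =>
    rcases Nat.lt_or_ge j 2 with h2 | h2
    · have hj : j = 1 := by omega
      subst hj
      norm_num [sB, tSum]
    · rcases Nat.lt_or_ge j 3 with h3 | h3
      · have hj : j = 2 := by omega
        subst hj
        norm_num [sB, tSum, fA]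
      · rw [sB_ge2 p j h2, ih (j - 1) (by omega) (by omega),
            ih (j / 2) (by omega) (by omega)]
        have hfj : (1 + (tSum p (j / 2)).fmod p).fmod p = fA p j := by
          rw [add_comm, Int.fmod_add_fmod, add_comm, ← fA_eq_tSum p j h3]
        rw [hfj, Int.fmod_add_fmod, ← tSum_succ p j h2]

-- ===== glue: Array operations seen through toList =====
theorem arr_getD_toList (a : Array Int) (n : Nat) (d : Int) :
    a.getD n d = a.toList.getD n d := by
  rw [Array.getD_eq_getD_getElem?, List.getD_eq_getElem?_getD, ← Array.getElem?_toList]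

theorem getD_set (xs : List Int) (n m : Nat) (v d : Int) (h : n < xs.length) :
    (xs.set n v).getD m d = if m = n then v else xs.getD m d := by
  rcases eq_or_ne m n with rfl | hne
  · rw [if_pos rfl, List.getD_eq_getElem?_getD, List.getElem?_set_self' ]
    simp [h]
  · rw [if_neg hne, List.getD_eq_getElem?_getD, List.getD_eq_getElem?_getD,
        List.getElem?_set_ne (by omega)]

-- A's loop body, on Arrays (the port's fold function) and on Lists
def stepA (p : Int) (arr : Array Int) (i : Int) : Array Int :=
  if PySem.Int.mod i 2 = 0 then
    arr.setIfInBounds i.toNat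
      (PySem.Int.mod
        (arr.getD (i - 1).toNat 0 + arr.getD (PySem.Int.floordiv i 2).toNat 0) p)
  else
    arr.setIfInBounds i.toNat (PySem.Int.mod (arr.getD (i - 1).toNat 0) p)

def stepAL (p : Int) (l : List Int) (i : Int) : List Int :=
  if PySem.Int.mod i 2 = 0 then
    l.set i.toNat
      (PySem.Int.mod (l.getD (i - 1).toNat 0 + l.getD (PySem.Int.floordiv i 2).toNat 0) p)
  else
    l.set i.toNat (PySem.Int.mod (l.getD (i - 1).toNat 0) p)

theorem stepA_toList (p : Int) (arr : Array Int) (i : Int) :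
    (stepA p arr i).toList = stepAL p arr.toList i := by
  unfold stepA stepAL
  split <;> simp [Array.toList_setIfInBounds]

-- B's loop body, on Arrays and on Lists
def stepB (p : Int) (s : Array Int) (j : Int) : Array Int :=
  s.setIfInBounds j.toNat
    (PySem.Int.mod
      (s.getD (j - 1).toNat 0 +
       PySem.Int.mod (1 + s.getD (PySem.Int.floordiv j 2).toNat 0) p) p)

def stepBL (p : Int) (l : List Int) (j : Int) : List Int :=
  l.set j.toNat
    (PySem.Int.mod
      (l.getD (j - 1).toNat 0 +
       PySem.Int.mod (1 + l.getD (PySem.Int.floordiv j 2).toNat 0) p) p)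

theorem stepB_toList (p : Int) (s : Array Int) (j : Int) :
    (stepB p s j).toList = stepBL p s.toList j := by
  unfold stepB stepBL
  simp [Array.toList_setIfInBounds]

-- ===== A-side loop invariant (on the List shadow of the array) =====
theorem A_loop (p : Int) (K : Nat) (hK : 3 ≤ K) :
    ∀ n : Nat, 3 ≤ n → n ≤ K →
      let L := (PySem.List.pyRange 3 (n : Int) 1).foldl (stepAL p)
        ((List.replicate K (0 : Int)).set 2 1)
      L.length = K ∧ ∀ j : Nat, L.getD j 0 = (if j < n then fA p j else 0) := by
  intro n
  induction n with
  | zero => omega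
  | succ n ih =>
    intro h3 hle
    rcases Nat.lt_or_ge n 3 with hn3 | hn3
    · -- base case: n + 1 = 3, empty range
      have hn : n = 2 := by omega
      subst hn
      rw [show ((2 + 1 : Nat) : Int) = 3 by norm_num, PySem.List.pyRange_one_eq_nil (by norm_num)]
      simp only [List.foldl_nil]
      have h2K : (2 : Nat) < (List.replicate K (0 : Int)).length := by simp; omega
      constructor
      · simp
      · intro j
        rw [getD_set _ _ _ _ _ h2K]
        by_cases hj2 : j = 2
        · subst hj2
          simp [fA]
        · rw [if_neg hj2]
          rcases Nat.lt_or_ge j K with hjK | hjK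
          · rw [List.getD_eq_getElem _ _ (by simpa using hjK)]
            simp only [List.getElem_replicate]
            split
            · interval_cases j <;> simp_all [fA]
            · rfl
          · rw [List.getD_eq_default _ _ (by simpa using hjK)]
            rw [if_neg (by omega)]
    · -- inductive step
      have hstep := ih (by omega) (by omega)
      have hsplit : PySem.List.pyRange 3 ((n + 1 : Nat) : Int) 1
          = PySem.List.pyRange 3 (n : Int) 1 ++ [(n : Int)] := by
        push_cast
        exact PySem.List.pyRange_one_succ_right (by exact_mod_cast by omega)
      rw [hsplit, List.foldl_append]
      set L := (PySem.List.pyRange 3 (n : Int) 1).foldl (stepAL p)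
        ((List.replicate K (0 : Int)).set 2 1) with hL
      obtain ⟨hlen, hget⟩ := hstep
      simp only [List.foldl_cons, List.foldl_nil]
      have hnK : n < K := by omega
      have hnlen : n < L.length := by omega
      have htoNat : ((n : Nat) : Int).toNat = n := by omega
      have hmod : PySem.Int.mod ((n : Nat) : Int) 2 = (((n % 2 : Nat)) : Int) := by
        exact_mod_cast PySem.Int.mod_natCast n 2
      have hdiv : (PySem.Int.floordiv ((n : Nat) : Int) 2).toNat = n / 2 := by
        rw [show (PySem.Int.floordiv ((n : Nat) : Int) 2) = (((n / 2 : Nat)) : Int) from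
          by exact_mod_cast PySem.Int.floordiv_natCast n 2]
        omega
      have hsub : (((n : Nat) : Int) - 1).toNat = n - 1 := by omega
      have hprev : L.getD (((n : Nat) : Int) - 1).toNat 0 = fA p (n - 1) := by
        rw [hsub, hget (n - 1), if_pos (by omega)]
      have hhalf : L.getD (PySem.Int.floordiv ((n : Nat) : Int) 2).toNat 0
          = fA p (n / 2) := by
        rw [hdiv, hget (n / 2), if_pos (by omega)]
      have hval : stepAL p L ((n : Nat) : Int) = L.set n (fA p n) := by
        unfold stepAL
        rw [hprev, hhalf, hmod, htoNat]
        by_cases he : n % 2 = 0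
        · rw [if_pos (by exact_mod_cast congrArg (Nat.cast (R := Int)) he),
              fA_ge3 p n (by omega), if_pos he]
          rfl
        · rw [if_neg (by exact_mod_cast fun h => he (by exact_mod_cast h)),
              fA_ge3 p n (by omega), if_neg he]
          rfl
      rw [hval]
      constructor
      · simpa using hlen
      · intro j
        rw [getD_set _ _ _ _ _ hnlen]
        by_cases hj : j = n
        · subst hj
          rw [if_pos rfl, if_pos (by omega)]
        · rw [if_neg hj, hget j]
          by_cases hlt : j < n
          · rw [if_pos hlt, if_pos (by omega)]
          · rw [if_neg hlt, if_neg (by omega)]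

-- ===== B-side loop invariant (on the List shadow of the array) =====
theorem B_loop (p : Int) (M : Nat) (hM : 2 ≤ M) :
    ∀ n : Nat, 2 ≤ n → n ≤ M →
      let L := (PySem.List.pyRange 2 (n : Int) 1).foldl (stepBL p)
        (List.replicate M (0 : Int))
      L.length = M ∧ ∀ j : Nat, L.getD j 0 = (if j < n then sB p j else 0) := by
  intro n
  induction n with
  | zero => omega
  | succ n ih =>
    intro h2 hle
    rcases Nat.lt_or_ge n 2 with hn2 | hn2
    · -- base: n + 1 = 2, empty range
      have hn : n = 1 := by omega
      subst hn
      rw [show ((1 + 1 : Nat) : Int) = 2 by norm_num, PySem.List.pyRange_one_eq_nil (by norm_num)]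
      simp only [List.foldl_nil]
      refine ⟨by simp, fun j => ?_⟩
      rcases Nat.lt_or_ge j M with hjM | hjM
      · rw [List.getD_eq_getElem _ _ (by simpa using hjM)]
        simp only [List.getElem_replicate]
        split
        · interval_cases j <;> simp [sB]
        · rfl
      · rw [List.getD_eq_default _ _ (by simpa using hjM)]
        rw [if_neg (by omega)]
    · -- step
      have hstep := ih (by omega) (by omega)
      have hsplit : PySem.List.pyRange 2 ((n + 1 : Nat) : Int) 1
          = PySem.List.pyRange 2 (n : Int) 1 ++ [(n : Int)] := by
        push_cast
        exact PySem.List.pyRange_one_succ_right (by exact_mod_cast by omega)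
      rw [hsplit, List.foldl_append]
      set L := (PySem.List.pyRange 2 (n : Int) 1).foldl (stepBL p)
        (List.replicate M (0 : Int)) with hL
      obtain ⟨hlen, hget⟩ := hstep
      simp only [List.foldl_cons, List.foldl_nil]
      have hnM : n < M := by omega
      have hnlen : n < L.length := by omega
      have htoNat : ((n : Nat) : Int).toNat = n := by omega
      have hdiv : (PySem.Int.floordiv ((n : Nat) : Int) 2).toNat = n / 2 := by
        rw [show (PySem.Int.floordiv ((n : Nat) : Int) 2) = (((n / 2 : Nat)) : Int) from
          by exact_mod_cast PySem.Int.floordiv_natCast n 2]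
        omega
      have hsub : (((n : Nat) : Int) - 1).toNat = n - 1 := by omega
      have hprev : L.getD (((n : Nat) : Int) - 1).toNat 0 = sB p (n - 1) := by
        rw [hsub, hget (n - 1), if_pos (by omega)]
      have hhalf : L.getD (PySem.Int.floordiv ((n : Nat) : Int) 2).toNat 0
          = sB p (n / 2) := by
        rw [hdiv, hget (n / 2), if_pos (by omega)]
      have hval : stepBL p L ((n : Nat) : Int) = L.set n (sB p n) := by
        unfold stepBL
        rw [hprev, hhalf, htoNat, sB_ge2 p n hn2]
        rfl
      rw [hval]
      refine ⟨by simpa using hlen, fun j => ?_⟩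
      rw [getD_set _ _ _ _ _ hnlen]
      by_cases hj : j = n
      · subst hj
        rw [if_pos rfl, if_pos (by omega)]
      · rw [if_neg hj, hget j]
        by_cases hlt : j < n
        · rw [if_pos hlt, if_pos (by omega)]
        · rw [if_neg hlt, if_neg (by omega)]

-- A returns fA p k for k ≥ 2
theorem solve_eq_fA (k p : Int) (hk : 2 ≤ k) :
    solve k p = fA p k.toNat := by
  have hk0 : ¬ (k = 0 ∨ k = 1) := by omega
  unfold solve
  rw [if_neg hk0]
  show ((PySem.List.pyRange 3 (k + 1) 1).foldl (stepA p)
    ((Array.replicate (k + 1).toNat (0 : Int)).setIfInBounds 2 1)).getD k.toNat 0 = fA p k.toNat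
  rw [arr_getD_toList, ← List.foldl_hom Array.toList (fun a i => (stepA_toList p a i).symm),
      Array.toList_setIfInBounds, Array.toList_replicate]
  rcases eq_or_lt_of_le hk with hk2 | hk3
  · -- k = 2: empty loop
    subst hk2
    rw [PySem.List.pyRange_one_eq_nil (by norm_num)]
    simp only [List.foldl_nil]
    have h1 : fA p (2 : Int).toNat = 1 := by
      show fA p 2 = 1
      simp [fA]
    rw [h1]
    decide
  · have hK : 3 ≤ (k + 1).toNat := by omega
    have hkk1 : (((k + 1).toNat : Nat) : Int) = k + 1 := by omega
    have := A_loop p (k + 1).toNat hK (k + 1).toNat (by omega) (le_refl _)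
    simp only at this
    rw [hkk1] at this
    obtain ⟨_, hget⟩ := this
    rw [hget k.toNat, if_pos (by omega)]

-- B returns (1 + sB p (k.toNat / 2)).fmod p for k ≥ 3
theorem solve_alt_eq_sB (k p : Int) (hk : 3 ≤ k) :
    solve_alt k p = (1 + sB p (k.toNat / 2)).fmod p := by
  have hk0 : ¬ (k = 0 ∨ k = 1) := by omega
  have hk2 : k ≠ 2 := by omega
  unfold solve_alt
  rw [if_neg hk0, if_neg hk2]
  show PySem.Int.mod (1 + ((PySem.List.pyRange 2 (PySem.Int.floordiv k 2 + 1) 1).foldl (stepB p)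
      (Array.replicate (PySem.Int.floordiv k 2 + 1).toNat (0 : Int))).getD
      (PySem.Int.floordiv k 2).toNat 0) p = (1 + sB p (k.toNat / 2)).fmod p
  rw [arr_getD_toList, ← List.foldl_hom Array.toList (fun a j => (stepB_toList p a j).symm),
      Array.toList_replicate]
  have hkk : (k.toNat : Int) = k := by omega
  have hdiv : PySem.Int.floordiv k 2 = ((k.toNat / 2 : Nat) : Int) := by
    rw [← hkk]
    exact_mod_cast PySem.Int.floordiv_natCast k.toNat 2
  rw [hdiv]
  have hM : 2 ≤ k.toNat / 2 + 1 := by omega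
  have hcast : (((k.toNat / 2 + 1 : Nat)) : Int) = ((k.toNat / 2 : Nat) : Int) + 1 := by
    push_cast; ring
  have hrepl : (((k.toNat / 2 : Nat) : Int) + 1).toNat = k.toNat / 2 + 1 := by omega
  have htn : (((k.toNat / 2 : Nat)) : Int).toNat = k.toNat / 2 := by omega
  have := B_loop p (k.toNat / 2 + 1) hM (k.toNat / 2 + 1) (by omega) (le_refl _)
  simp only at this
  rw [hcast] at this
  obtain ⟨_, hget⟩ := this
  rw [hrepl, htn, hget (k.toNat / 2), if_pos (by omega)]
  rfl

-- ===== VERDICT (by name: the statement is the Claim_ definition above) =====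
theorem solve_spec : Claim_equal_solve := by
  intro k p _ hpre
  unfold Spec_solve
  obtain ⟨hk0, _⟩ := hpre
  rcases Nat.lt_or_ge k.toNat 3 with h3 | h3
  · -- k ∈ {0, 1, 2}
    interval_cases h : k.toNat
    · have : k = 0 := by omega
      subst this
      simp [solve, solve_alt]
    · have : k = 1 := by omega
      subst this
      simp [solve, solve_alt]
    · have : k = 2 := by omega
      subst this
      rw [solve_eq_fA 2 p (by norm_num)]
      show fA p 2 = solve_alt 2 p
      simp [fA, solve_alt]
  · have hk3 : 3 ≤ k := by omega
    rw [solve_eq_fA k p (by omega), solve_alt_eq_sB k p hk3,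
        fA_eq_tSum p k.toNat (by omega)]
    have h1 : 1 ≤ k.toNat / 2 := by omega
    rw [sB_eq_tSum p (k.toNat / 2) h1,
        add_comm (1 : Int) ((tSum p (k.toNat / 2)).fmod p), Int.fmod_add_fmod, add_comm]
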